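-- pv_equiv track=rewrite | github.com/matluz1/lorekit | src/lorekit/npc/prefetch.py | _format_timeline
-- ===== SOURCE A (Python) =====
-- _CHARS_PER_TOKEN = 4
--
-- def _estimate_tokens(text: str) -> int:
--     """Estimate token count from character length."""
--     return max(1, len(text) // _CHARS_PER_TOKEN)
--
-- def _format_timeline(entries: list[str], token_budget: int) -> tuple[str, int]:
--     """Format timeline entries within token budget."""
--     if not entries:
--         return "", 0
--
--     lines = ["## Recent Events"]
--     tokens_used = _estimate_tokens(lines[0])
--
--     for entry in entries:
--         entry_tokens = _estimate_tokens(entry)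
--         if tokens_used + entry_tokens > token_budget:
--             break
--         lines.append(entry)
--         tokens_used += entry_tokens
--
--     return "\n".join(lines), tokens_used
-- ===== SOURCE B (Python) =====
-- _CHARS_PER_TOKEN = 4
--
--
-- def _estimate_tokens(text: str) -> int:
--     """Estimate token count from character length."""
--     return max(1, len(text) // _CHARS_PER_TOKEN)
--
--
-- def _format_timeline(entries: list[str], token_budget: int) -> tuple[str, int]:
--     """Format timeline entries within token budget (prefix-sum formulation)."""
--     if not entries:
--         return "", 0
--
--     header = "## Recent Events"
--     # Cumulative token counts: sums[i] = header tokens + tokens of entries[:i].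
--     sums = [_estimate_tokens(header)]
--     for e in entries:
--         sums.append(sums[-1] + _estimate_tokens(e))
--
--     # Estimates are >= 1, so sums is strictly increasing: the first index whose
--     # cumulative count exceeds the budget is the cutoff.
--     cut = next((i for i, s in enumerate(sums) if s > token_budget), len(sums))
--     k = max(cut - 1, 0)
--     return "\n".join([header] + entries[:k]), sums[k]
-- ===== Notes on version B (the rewrite author's own statement) =====
-- stated objective: alternative
-- what changed: Replaces the single accumulate-and-break loop by a prefix-sum formulation: build the list of cumulative token counts, locate the first index exceeding the budget (sums are strictly increasing since estimates are >= 1), then slice-and-join the entries before the cutoff.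
import Mathlib
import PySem

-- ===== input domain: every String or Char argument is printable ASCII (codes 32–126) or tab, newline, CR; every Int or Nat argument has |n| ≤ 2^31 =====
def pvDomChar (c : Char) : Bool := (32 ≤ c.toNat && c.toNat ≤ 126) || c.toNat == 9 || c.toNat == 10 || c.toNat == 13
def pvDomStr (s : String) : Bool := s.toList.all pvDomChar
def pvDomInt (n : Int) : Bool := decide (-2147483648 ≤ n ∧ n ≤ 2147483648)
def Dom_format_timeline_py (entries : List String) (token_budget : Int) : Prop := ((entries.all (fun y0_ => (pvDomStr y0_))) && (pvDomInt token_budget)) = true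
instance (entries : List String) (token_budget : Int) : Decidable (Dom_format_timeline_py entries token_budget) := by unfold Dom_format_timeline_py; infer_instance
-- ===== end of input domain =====

-- B replaces A's accumulate-and-break loop by a prefix-sum list plus a cutoff search (alternative decomposition, same cost).

-- ===== PORT A =====
-- _estimate_tokens (shared helper of both Python files)
def estTok (text : String) : Int := max 1 (PySem.Int.floordiv (PySem.Str.len text) 4)

-- A's for-loop with `break`, as a foldl over (lines, tokens_used, stopped)
def format_timeline_py (entries : List String) (token_budget : Int) : String × Int :=
  if entries = [] then ("", 0)
  else
    let header := "## Recent Events"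
    let st := entries.foldl
      (fun (st : List String × Int × Bool) entry =>
        if st.2.2 then st
        else
          let entry_tokens := estTok entry
          if st.2.1 + entry_tokens > token_budget then (st.1, st.2.1, true)
          else (st.1 ++ [entry], st.2.1 + entry_tokens, false))
      ([header], estTok header, false)
    (PySem.Str.join "\n" st.1, st.2.1)

-- ===== PORT B =====
def format_timeline_py_alt (entries : List String) (token_budget : Int) : String × Int :=
  if entries = [] then ("", 0)
  else
    let header := "## Recent Events"
    -- sums.append(sums[-1] + _estimate_tokens(e)); sums is never empty, so sums[-1] never raises
    let sums := entries.foldl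
      (fun (acc : List Int) e => acc ++ [PySem.List.pyGetD acc (-1) 0 + estTok e])
      [estTok header]
    -- next((i for i, s in enumerate(sums) if s > token_budget), len(sums))
    let cut : Int :=
      match sums.findIdx? (fun s => decide (s > token_budget)) with
      | some i => (i : Int)
      | none => PySem.List.len sums
    let k : Int := max (cut - 1) 0
    -- 0 ≤ k ≤ len(entries) and k < len(sums), so the slice and sums[k] are exact (sums[k] never raises)
    (PySem.Str.join "\n" (header :: PySem.List.slice entries none (some k)),
     PySem.List.pyGetD sums k 0)

-- ===== PRECONDITION & SPEC =====
def Spec_format_timeline_py (entries : List String) (token_budget : Int) (out : String × Int) : Prop := out = format_timeline_py_alt entries token_budget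
instance (entries : List String) (token_budget : Int) (out : String × Int) : Decidable (Spec_format_timeline_py entries token_budget out) := by unfold Spec_format_timeline_py; infer_instance

-- ===== CLAIM (what is proved, stated in full; the proofs are below) =====
def Claim_equal_format_timeline_py : Prop := ∀ (entries : List String) (token_budget : Int), Dom_format_timeline_py entries token_budget → Spec_format_timeline_py entries token_budget (format_timeline_py entries token_budget)

-- ===== LEMMAS AND PROOFS =====

-- Reference recursion: the entries that fit and the final token count.
def goFT (tb : Int) : Int → List String → List String × Int
  | used, [] => ([], used)
  | used, e :: r =>
    if used + estTok e > tb then ([], used)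
    else
      let p := goFT tb (used + estTok e) r
      (e :: p.1, p.2)

-- Reference prefix sums.
def psumsFT : Int → List String → List Int
  | b, [] => [b]
  | b, e :: r => b :: psumsFT (b + estTok e) r

theorem estTok_pos (s : String) : 1 ≤ estTok s := le_max_left _ _

theorem psumsFT_ne_nil (b : Int) (l : List String) : psumsFT b l ≠ [] := by
  cases l <;> simp [psumsFT]

theorem psumsFT_head (b : Int) (l : List String) :
    psumsFT b l = b :: (psumsFT b l).tail := by
  cases l <;> simp [psumsFT]

-- A's foldl, stopped flag set: nothing changes.
theorem foldA_stopped (tb : Int) (l : List String) (lines : List String) (used : Int) :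
    l.foldl
      (fun (st : List String × Int × Bool) entry =>
        if st.2.2 then st
        else
          let t := estTok entry
          if st.2.1 + t > tb then (st.1, st.2.1, true)
          else (st.1 ++ [entry], st.2.1 + t, false))
      (lines, used, true) = (lines, used, true) := by
  induction l with
  | nil => rfl
  | cons e r ih => simpa using ih

-- A's foldl computes goFT.
theorem foldA_go (tb : Int) (l : List String) :
    ∀ (lines : List String) (used : Int),
      ((l.foldl
        (fun (st : List String × Int × Bool) entry =>
          if st.2.2 then st
          else
            let t := estTok entry
            if st.2.1 + t > tb then (st.1, st.2.1, true)
            else (st.1 ++ [entry], st.2.1 + t, false))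
        (lines, used, false)).1 = lines ++ (goFT tb used l).1 ∧
      (l.foldl
        (fun (st : List String × Int × Bool) entry =>
          if st.2.2 then st
          else
            let t := estTok entry
            if st.2.1 + t > tb then (st.1, st.2.1, true)
            else (st.1 ++ [entry], st.2.1 + t, false))
        (lines, used, false)).2.1 = (goFT tb used l).2) := by
  induction l with
  | nil => intro lines used; simp [goFT]
  | cons e r ih =>
    intro lines used
    by_cases h : used + estTok e > tb
    · simp [goFT, h, foldA_stopped]
    · have := ih (lines ++ [e]) (used + estTok e)
      simp [goFT, h] at this ⊢
      exact this

-- B's sums loop builds the reference prefix sums.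
theorem foldB_psums (l : List String) :
    ∀ (pre : List Int) (b : Int),
      l.foldl (fun (acc : List Int) e => acc ++ [PySem.List.pyGetD acc (-1) 0 + estTok e])
        (pre ++ [b]) = pre ++ psumsFT b l := by
  induction l with
  | nil => intro pre b; simp [psumsFT]
  | cons e r ih =>
    intro pre b
    have h1 : PySem.List.pyGetD (pre ++ [b]) (-1) 0 = b :=
      PySem.List.pyGetD_neg_one_append_singleton _ _ _
    calc (e :: r).foldl _ (pre ++ [b])
        = r.foldl (fun (acc : List Int) e => acc ++ [PySem.List.pyGetD acc (-1) 0 + estTok e])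
            ((pre ++ [b]) ++ [b + estTok e]) := by simp [h1]
      _ = (pre ++ [b]) ++ psumsFT (b + estTok e) r := ih _ _
      _ = pre ++ psumsFT b (e :: r) := by simp [psumsFT]

-- pyGetD on a cons with a positive index.
theorem pyGetD_cons_pos (x : Int) (xs : List Int) (i : Int) (d : Int) (h : 1 ≤ i) :
    PySem.List.pyGetD (x :: xs) i d = PySem.List.pyGetD xs (i - 1) d := by
  have h0 : 0 ≤ i - 1 := by omega
  rcases Int.eq_ofNat_of_zero_le h0 with ⟨n, hn⟩
  have hi : i = ((n + 1 : Nat) : Int) := by omega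
  subst hi
  simp [PySem.List.pyGetD, PySem.List.pyGet?_natCast]

-- B's cutoff computation equals goFT.
theorem mainB (tb : Int) (l : List String) :
    ∀ b : Int,
      (PySem.List.slice l none
          (some (max ((match (psumsFT b l).findIdx? (fun s => decide (s > tb)) with
                        | some i => (i : Int)
                        | none => PySem.List.len (psumsFT b l)) - 1) 0)) = (goFT tb b l).1) ∧
      (PySem.List.pyGetD (psumsFT b l)
          (max ((match (psumsFT b l).findIdx? (fun s => decide (s > tb)) with
                  | some i => (i : Int)
                  | none => PySem.List.len (psumsFT b l)) - 1) 0) 0 = (goFT tb b l).2) := by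
  induction l with
  | nil =>
    intro b
    by_cases h : b > tb <;>
      simp [psumsFT, goFT, List.findIdx?_cons, h, PySem.List.len_eq, PySem.List.pyGetD,
        PySem.List.slice]
  | cons e r ih =>
    intro b
    have ht := estTok_pos e
    by_cases hbt : b + estTok e > tb
    · -- nothing fits beyond the header tokens b
      have hhead : (psumsFT (b + estTok e) r).findIdx? (fun s => decide (s > tb)) = some 0 := by
        rw [psumsFT_head, List.findIdx?_cons]
        simp [hbt]
      by_cases hb : b > tb
      · simp [psumsFT, goFT, hbt, List.findIdx?_cons, hb, PySem.List.pyGetD,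
          PySem.List.slice]
      · simp only [psumsFT, goFT, hbt, if_pos, List.findIdx?_cons, hhead]
        simp [hb, PySem.List.pyGetD, PySem.List.slice]
    · -- e fits: peel it off and use the IH at base b + estTok e
      have hb : ¬ b > tb := by omega
      have ih' := ih (b + estTok e)
      -- cut' ≥ 1 : the head of psumsFT (b+estTok e) r is ≤ tb
      have hcut1 :
          1 ≤ (match (psumsFT (b + estTok e) r).findIdx? (fun s => decide (s > tb)) with
                | some i => (i : Int)
                | none => PySem.List.len (psumsFT (b + estTok e) r)) := by
        rcases hfi : (psumsFT (b + estTok e) r).findIdx? (fun s => decide (s > tb)) with _ | i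
        · simp only
          rw [PySem.List.len_eq]
          have := psumsFT_ne_nil (b + estTok e) r
          have : 0 < (psumsFT (b + estTok e) r).length := List.length_pos_of_ne_nil this
          omega
        · simp only
          have hmem := List.findIdx?_eq_some_iff_findIdx_eq.mp hfi
          by_contra hlt
          have hi0 : i = 0 := by omega
          subst hi0
          have h0 : (psumsFT (b + estTok e) r)[0]? = some (b + estTok e) := by
            rw [psumsFT_head]; rfl
          have := List.findIdx?_eq_some_iff_getElem.mp hfi
          rcases this with ⟨hlen, hp, -⟩
          have : (psumsFT (b + estTok e) r)[0] = b + estTok e := by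
            have := List.getElem?_eq_getElem hlen
            rw [h0] at this; exact (Option.some.inj this).symm
          rw [this] at hp
          simp at hp
          omega
      set cut' : Int := (match (psumsFT (b + estTok e) r).findIdx? (fun s => decide (s > tb)) with
            | some i => (i : Int)
            | none => PySem.List.len (psumsFT (b + estTok e) r)) with hcut'
      -- the whole cut on (e :: r) is cut' + 1
      have hsplit : (psumsFT b (e :: r)).findIdx? (fun s => decide (s > tb)) =
          Option.map (fun i => i + 1) ((psumsFT (b + estTok e) r).findIdx? (fun s => decide (s > tb))) := by
        simp [psumsFT, List.findIdx?_cons, hb]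
      have hcut : (match (psumsFT b (e :: r)).findIdx? (fun s => decide (s > tb)) with
            | some i => (i : Int)
            | none => PySem.List.len (psumsFT b (e :: r))) = cut' + 1 := by
        rw [hsplit]
        rcases hfi : (psumsFT (b + estTok e) r).findIdx? (fun s => decide (s > tb)) with _ | i
        · simp only [Option.map_none]
          rw [hcut', hfi]
          simp only [psumsFT, PySem.List.len_eq, List.length_cons]
          push_cast; ring
        · simp only [Option.map_some]
          rw [hcut', hfi]
          push_cast; ring
      rw [hcut]
      have hk : max (cut' + 1 - 1) 0 = cut' := by omega
      rw [hk]
      constructor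
      · -- slice (e :: r) [:cut'] = e :: slice r [:cut'-1]
        have h1 : max (cut' - 1) 0 = cut' - 1 := by omega
        rcases Int.eq_ofNat_of_zero_le (by omega : (0:Int) ≤ cut' - 1) with ⟨m, hm⟩
        have hc : cut' = ((m + 1 : Nat) : Int) := by omega
        rw [hc, PySem.List.slice_to_natCast]
        have hrec := ih'.1
        rw [h1, hm, PySem.List.slice_to_natCast] at hrec
        simp [goFT, hbt, List.take_succ_cons, hrec]
      · -- sums[cut'] on b :: psums' = psums'[cut'-1]
        rw [show psumsFT b (e :: r) = b :: psumsFT (b + estTok e) r from rfl]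
        rw [pyGetD_cons_pos _ _ _ _ hcut1]
        have hrec := ih'.2
        have h1 : max (cut' - 1) 0 = cut' - 1 := by omega
        rw [h1] at hrec
        simp [goFT, hbt, hrec]

-- ===== VERDICT (by name: the statement is the Claim_ definition above) =====
theorem format_timeline_py_spec : Claim_equal_format_timeline_py := by
  intro entries token_budget _
  unfold Spec_format_timeline_py format_timeline_py format_timeline_py_alt
  by_cases h : entries = []
  · simp [h]
  · simp only [h, if_false]
    have hA := foldA_go token_budget entries ["## Recent Events"] (estTok "## Recent Events")
    have hB : entries.foldl
        (fun (acc : List Int) e => acc ++ [PySem.List.pyGetD acc (-1) 0 + estTok e])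
        [estTok "## Recent Events"] = psumsFT (estTok "## Recent Events") entries := by
      have := foldB_psums entries [] (estTok "## Recent Events")
      simpa using this
    have hM := mainB token_budget entries (estTok "## Recent Events")
    simp only [hB]
    rw [Prod.ext_iff]
    constructor
    · simp only
      rw [hA.1, hM.1]
      rfl
    · simp only
      rw [hA.2, hM.2]
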